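-- pv_equiv track=rewrite | github.com/CL-ZHAO-git/Financial_News_Sentiment_Analysis_System-based_on_BERT | code/Dash/cls_crawler.py | find_mentioned_stocks
-- ===== SOURCE A (Python) =====
-- def find_mentioned_stocks(name_list, text):
--     mentioned_stocks = []
--     for stock_name in name_list:
--         if text.find(stock_name) != -1:
--             mentioned_stocks.append(stock_name)
--         else:
--             continue
--     return mentioned_stocks
-- ===== SOURCE B (Python) =====
-- def find_mentioned_stocks(name_list, text):
--     # one pass over the text per distinct name length: build the set of all
--     # substrings of text having a length that occurs in name_list, then filter
--     lengths = {len(name) for name in name_list}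
--     subs = {text[i:i + L] for L in lengths for i in range(len(text) - L + 1)}
--     return [name for name in name_list if name in subs]
-- ===== Notes on version B (the rewrite author's own statement) =====
-- stated objective: faster
-- what changed: Instead of scanning the text once per name with text.find, B builds the set of all substrings of the text whose length occurs among the names (one slicing pass per distinct name length) and filters name_list by O(1) set membership.
import Mathlib
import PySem

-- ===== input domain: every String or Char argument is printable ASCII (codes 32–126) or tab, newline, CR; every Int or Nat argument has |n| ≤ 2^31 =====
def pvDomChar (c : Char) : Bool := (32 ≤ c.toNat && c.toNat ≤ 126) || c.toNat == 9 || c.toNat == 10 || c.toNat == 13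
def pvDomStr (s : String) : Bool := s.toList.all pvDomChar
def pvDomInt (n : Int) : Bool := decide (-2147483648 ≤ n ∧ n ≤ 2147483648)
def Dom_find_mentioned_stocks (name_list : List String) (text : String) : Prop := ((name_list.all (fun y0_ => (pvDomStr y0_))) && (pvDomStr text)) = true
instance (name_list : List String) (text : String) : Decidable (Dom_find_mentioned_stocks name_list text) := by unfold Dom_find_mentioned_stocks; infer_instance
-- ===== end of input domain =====

-- B replaces the per-name text scan by one substring set built from the text
-- (one pass per distinct name length), then filters name_list by set membership.

-- ===== PORT A =====
def find_mentioned_stocks (name_list : List String) (text : String) : List String :=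
  name_list.foldl
    (fun mentioned_stocks stock_name =>
      if PySem.Str.find text stock_name ≠ -1 then mentioned_stocks ++ [stock_name]
      else mentioned_stocks)
    []

-- ===== PORT B =====
def find_mentioned_stocks_alt (name_list : List String) (text : String) : List String :=
  let lengths : PySem.Set Int := PySem.Set.ofList (name_list.map (fun name => PySem.Str.len name))
  let subs : PySem.Set String := PySem.Set.ofList
    (lengths.flatMap (fun L =>
      (PySem.List.pyRange 0 (PySem.Str.len text - L + 1) 1).map
        (fun i => PySem.Str.slice text (some i) (some (i + L)))))
  name_list.filter (fun name => PySem.Set.contains subs name)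

-- ===== PRECONDITION & SPEC =====
def Spec_find_mentioned_stocks (name_list : List String) (text : String) (out : List String) : Prop := out = find_mentioned_stocks_alt name_list text
instance (name_list : List String) (text : String) (out : List String) : Decidable (Spec_find_mentioned_stocks name_list text out) := by unfold Spec_find_mentioned_stocks; infer_instance

-- ===== CLAIM (what is proved, stated in full; the proofs are below) =====
def Claim_equal_find_mentioned_stocks : Prop := ∀ (name_list : List String) (text : String), Dom_find_mentioned_stocks name_list text → Spec_find_mentioned_stocks name_list text (find_mentioned_stocks name_list text)

-- ===== LEMMAS AND PROOFS =====

-- a name from name_list is in B's substring list iff it occurs in the text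
theorem mem_subs_iff_infix (name_list : List String) (text : String) (n : String)
    (hn : n ∈ name_list) :
    (n ∈ (PySem.Set.ofList (name_list.map (fun name => PySem.Str.len name))).flatMap (fun L =>
      (PySem.List.pyRange 0 (PySem.Str.len text - L + 1) 1).map
        (fun i => PySem.Str.slice text (some i) (some (i + L))))) ↔ n.toList <:+: text.toList := by
  constructor
  · rintro h
    rw [List.mem_flatMap] at h
    obtain ⟨L, hL, hmem⟩ := h
    rw [List.mem_map] at hmem
    obtain ⟨i, hi, rfl⟩ := hmem
    rw [PySem.List.mem_pyRange_one] at hi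
    have hL0 : 0 ≤ L := by
      rw [PySem.Set.mem_ofList, List.mem_map] at hL
      obtain ⟨m, _, rfl⟩ := hL
      simp [PySem.Str.len_eq]
    have h1 : (PySem.Str.slice text (some i) (some (i + L))).toList
        = List.take ((i + L).toNat - i.toNat) (List.drop i.toNat text.toList) := by
      rw [PySem.Str.toList_slice, PySem.Chars.slice_eq_listSlice,
        PySem.List.slice_toNat text.toList hi.1 (by omega)]
    rw [h1]
    exact (List.take_prefix _ _).isInfix.trans (List.drop_suffix _ _).isInfix
  · intro h
    obtain ⟨j, hj⟩ := (PySem.Chars.exists_prefix_drop_iff_isIn n.toList text.toList).mpr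
      ((PySem.Chars.isIn_iff_infix n.toList text.toList).mpr h)
    -- normalise j into range
    set j' : Nat := min j text.toList.length with hj'def
    have hj' : n.toList <+: List.drop j' text.toList := by
      rcases Nat.le_total j text.toList.length with hle | hge
      · rw [hj'def, Nat.min_eq_left hle]
        exact hj
      · have hnil : List.drop j text.toList = [] := List.drop_eq_nil_of_le hge
        have hn0 : n.toList = [] := List.prefix_nil.mp (hnil ▸ hj)
        rw [hn0]
        exact List.nil_prefix
    have hlen : n.toList.length + j' ≤ text.toList.length := by
      have h2 := hj'.length_le
      rw [List.length_drop] at h2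
      have h3 : j' ≤ text.toList.length := Nat.min_le_right _ _
      omega
    rw [List.mem_flatMap]
    refine ⟨(n.toList.length : Int), ?_, ?_⟩
    · rw [PySem.Set.mem_ofList, List.mem_map]
      exact ⟨n, hn, by simp [PySem.Str.len_eq]⟩
    · rw [List.mem_map]
      refine ⟨(j' : Int), ?_, ?_⟩
      · rw [PySem.List.mem_pyRange_one]
        constructor
        · exact Int.natCast_nonneg j'
        · rw [PySem.Str.len_eq]
          omega
      · apply String.toList_inj.mp
        rw [PySem.Str.toList_slice, PySem.Chars.slice_eq_listSlice,
          PySem.List.slice_toNat text.toList (Int.natCast_nonneg j') (by positivity)]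
        have hnat : ((j' : Int) + (n.toList.length : Int)).toNat - ((j' : Int)).toNat
            = n.toList.length := by omega
        rw [hnat]
        exact (List.prefix_iff_eq_take.mp hj').symm

-- ===== VERDICT (by name: the statement is the Claim_ definition above) =====
theorem find_mentioned_stocks_spec : Claim_equal_find_mentioned_stocks := by
  intro name_list text _
  unfold Spec_find_mentioned_stocks find_mentioned_stocks find_mentioned_stocks_alt
  have hA := PySem.List.foldl_append_if
    (fun n => decide (PySem.Str.find text n ≠ -1)) (fun n => n) name_list []
  simp only [decide_eq_true_eq] at hA
  rw [hA]
  simp only [List.nil_append, List.map_id_fun', id]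
  apply List.filter_congr
  intro n hn
  rw [Bool.eq_iff_iff]
  simp only [decide_eq_true_eq, PySem.Set.contains_iff, PySem.Set.mem_ofList]
  rw [mem_subs_iff_infix name_list text n hn, PySem.Str.find_ne_neg_one_iff]
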